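-- pv_equiv track=rewrite | github.com/rahul-M-sdet/PythonPractice | PythoSelenium/charnumspecial.py | segregate_char_num_special
-- ===== SOURCE A (Python) =====
-- def segregate_char_num_special(string):
--     Chars=[]
--     Nums=[]
--     Specials=[]
--     for char in string:
--         if char.isalpha():
--             Chars.append(char)
--         elif char.isdigit():
--             Nums.append(char)
--         else:
--             Specials.append(char)
--     return Chars,Nums,Specials
-- ===== SOURCE B (Python) =====
-- def segregate_char_num_special(string):
--     def cat(c):
--         if c.isalpha():
--             return 0
--         if c.isdigit():
--             return 1
--         return 2
--     ordered = sorted(string, key=cat)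
--     n0 = sum(c.isalpha() for c in string)
--     n1 = sum(c.isdigit() for c in string)
--     return ordered[:n0], ordered[n0:n0 + n1], ordered[n0 + n1:]
-- ===== Notes on version B (the rewrite author's own statement) =====
-- stated objective: alternative
-- what changed: Instead of classifying each character into one of three accumulators in a loop, B stably sorts the characters by a 3-valued category key and slices the sorted list at the two boundaries obtained by counting letters and digits; stability of Python's sort preserves the original order within each category.
import Mathlib
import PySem

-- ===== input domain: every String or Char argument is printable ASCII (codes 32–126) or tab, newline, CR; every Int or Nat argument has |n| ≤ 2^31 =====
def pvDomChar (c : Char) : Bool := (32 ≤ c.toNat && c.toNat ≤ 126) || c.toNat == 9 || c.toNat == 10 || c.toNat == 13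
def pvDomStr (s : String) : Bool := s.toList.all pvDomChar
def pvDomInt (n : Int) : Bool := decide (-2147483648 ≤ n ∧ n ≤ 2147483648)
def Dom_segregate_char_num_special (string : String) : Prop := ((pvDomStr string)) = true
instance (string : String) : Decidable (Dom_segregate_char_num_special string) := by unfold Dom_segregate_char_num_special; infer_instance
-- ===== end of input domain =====

-- B replaces A's single classifying loop by a different algorithm: stably sort the characters
-- by a 3-valued category key, then slice the sorted list at the two counted boundaries.

-- ===== PORT A =====
-- single pass: fold over the characters with the three accumulator lists as state
def segregate_char_num_special (string : String) : List String × List String × List String :=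
  let st := string.toList.foldl
    (fun (acc : List String × List String × List String) c =>
      let (chars, nums, specials) := acc
      if PySem.Chars.isalpha c then (chars ++ [String.mk [c]], nums, specials)
      else if PySem.Chars.isdigit c then (chars, nums ++ [String.mk [c]], specials)
      else (chars, nums, specials ++ [String.mk [c]]))
    ([], [], [])
  st

-- ===== PORT B =====
-- the 3-valued category key cat(c) of Source B
def pvCat (c : Char) : Nat :=
  if PySem.Chars.isalpha c then 0
  else if PySem.Chars.isdigit c then 1
  else 2

-- sort-then-slice: sorted(string, key=cat) is PySem.List.sorted; the slices ordered[:n0],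
-- ordered[n0:n0+n1], ordered[n0+n1:] have nonnegative in-range bounds, so take/drop is exact.
def segregate_char_num_special_alt (string : String) : List String × List String × List String :=
  let ordered := PySem.List.sorted string.toList pvCat
  let n0 := (string.toList.map (fun c => if PySem.Chars.isalpha c then 1 else 0)).sum
  let n1 := (string.toList.map (fun c => if PySem.Chars.isdigit c then 1 else 0)).sum
  ((ordered.take n0).map (fun c => String.mk [c]),
   ((ordered.drop n0).take n1).map (fun c => String.mk [c]),
   (ordered.drop (n0 + n1)).map (fun c => String.mk [c]))

-- ===== PRECONDITION & SPEC =====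
def Spec_segregate_char_num_special (string : String) (out : List String × List String × List String) : Prop := out = segregate_char_num_special_alt string
instance (string : String) (out : List String × List String × List String) : Decidable (Spec_segregate_char_num_special string out) := by unfold Spec_segregate_char_num_special; infer_instance

-- ===== CLAIM (what is proved, stated in full; the proofs are below) =====
def Claim_equal_segregate_char_num_special : Prop := ∀ (string : String), Dom_segregate_char_num_special string → Spec_segregate_char_num_special string (segregate_char_num_special string)

-- ===== LEMMAS AND PROOFS =====
theorem alpha_not_digit (c : Char) (h : PySem.Chars.isalpha c = true) : PySem.Chars.isdigit c = false := by
  simp [PySem.Chars.isalpha, PySem.Chars.isupper, PySem.Chars.islower, PySem.Chars.isdigit,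
    Char.le_def, UInt32.le_iff_toNat_le] at *
  rcases h with h | h <;> omega

-- A's fold equals the three filters (with accumulated prefixes)
theorem segregate_fold_eq (l : List Char) (a b s : List String) :
    l.foldl
      (fun (acc : List String × List String × List String) c =>
        let (chars, nums, specials) := acc
        if PySem.Chars.isalpha c then (chars ++ [String.mk [c]], nums, specials)
        else if PySem.Chars.isdigit c then (chars, nums ++ [String.mk [c]], specials)
        else (chars, nums, specials ++ [String.mk [c]]))
      (a, b, s)
    = (a ++ (l.filter (fun c => pvCat c == 0)).map (fun c => String.mk [c]),
       b ++ (l.filter (fun c => pvCat c == 1)).map (fun c => String.mk [c]),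
       s ++ (l.filter (fun c => pvCat c == 2)).map (fun c => String.mk [c])) := by
  induction l generalizing a b s with
  | nil => simp
  | cons c t ih =>
    simp only [List.foldl_cons, List.filter_cons]
    by_cases h1 : PySem.Chars.isalpha c
    · simp [pvCat, h1, ih]
    · by_cases h2 : PySem.Chars.isdigit c
      · simp [pvCat, h1, h2, ih]
      · simp [pvCat, h1, h2, ih]

-- inserting x into u ++ v where x comes after all of u and before all of v
theorem insertBy_between (key : Char → Nat) (x : Char) (u v : List Char)
    (hu : ∀ y ∈ u, ¬ key x < key y) (hv : ∀ y ∈ v, key x < key y) :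
    PySem.List.insertBy (fun a b => decide (key a < key b)) x (u ++ v) = u ++ x :: v := by
  induction u with
  | nil =>
    cases v with
    | nil => simp [PySem.List.insertBy]
    | cons y ys => simp [PySem.List.insertBy, hv y (by simp)]
  | cons y ys ih =>
    simp only [List.cons_append, PySem.List.insertBy]
    rw [if_neg (by simpa using hu y (by simp))]
    simp [ih (fun z hz => hu z (by simp [hz]))]

-- the category of every element of a category filter
theorem mem_filter_cat (i : Nat) (l : List Char) (y : Char)
    (hy : y ∈ l.filter (fun c => pvCat c == i)) : pvCat y = i := by
  simpa using (List.of_mem_filter hy)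

-- the stable sort by the 3-valued key is exactly the three category filters concatenated
theorem sorted_cat_eq_groups (l : List Char) :
    PySem.List.sorted l pvCat
      = l.filter (fun c => pvCat c == 0) ++ l.filter (fun c => pvCat c == 1)
          ++ l.filter (fun c => pvCat c == 2) := by
  induction l using List.reverseRecOn with
  | nil => simp [PySem.List.sorted_eq_foldl_insertBy]
  | append_singleton t x ih =>
    rw [PySem.List.sorted_eq_foldl_insertBy] at ih ⊢
    rw [List.foldl_append, List.foldl_cons, List.foldl_nil, ih]
    have hx : pvCat x = 0 ∨ pvCat x = 1 ∨ pvCat x = 2 := by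
      unfold pvCat; split_ifs <;> simp
    rcases hx with h | h | h
    · rw [show (t.filter (fun c => pvCat c == 0) ++ t.filter (fun c => pvCat c == 1)
            ++ t.filter (fun c => pvCat c == 2))
          = t.filter (fun c => pvCat c == 0) ++ (t.filter (fun c => pvCat c == 1)
            ++ t.filter (fun c => pvCat c == 2)) by simp,
        insertBy_between pvCat x _ _
          (fun y hy => by rw [h, mem_filter_cat 0 t y hy]; omega)
          (fun y hy => by
            rcases List.mem_append.mp hy with h1 | h2
            · rw [h, mem_filter_cat 1 t y h1]; omega
            · rw [h, mem_filter_cat 2 t y h2]; omega)]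
      simp [List.filter_append, h]
    · rw [show (t.filter (fun c => pvCat c == 0) ++ t.filter (fun c => pvCat c == 1)
            ++ t.filter (fun c => pvCat c == 2))
          = (t.filter (fun c => pvCat c == 0) ++ t.filter (fun c => pvCat c == 1))
            ++ t.filter (fun c => pvCat c == 2) by simp,
        insertBy_between pvCat x _ _
          (fun y hy => by
            rcases List.mem_append.mp hy with h1 | h2
            · rw [h, mem_filter_cat 0 t y h1]; omega
            · rw [h, mem_filter_cat 1 t y h2]; omega)
          (fun y hy => by rw [h, mem_filter_cat 2 t y hy]; omega)]
      simp [List.filter_append, h]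
    · rw [show (t.filter (fun c => pvCat c == 0) ++ t.filter (fun c => pvCat c == 1)
            ++ t.filter (fun c => pvCat c == 2))
          = (t.filter (fun c => pvCat c == 0) ++ t.filter (fun c => pvCat c == 1)
            ++ t.filter (fun c => pvCat c == 2)) ++ [] by simp,
        insertBy_between pvCat x _ []
          (fun y hy => by
            simp only [List.append_assoc, List.mem_append] at hy
            rcases hy with h1 | h2 | h3
            · rw [h, mem_filter_cat 0 t y h1]; omega
            · rw [h, mem_filter_cat 1 t y h2]; omega
            · rw [h, mem_filter_cat 2 t y h3]; omega)
          (by simp)]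
      simp [List.filter_append, h]

-- the boolean sums of Source B count the category filters
theorem sum_indicator_eq_length_filter (p : Char → Bool) (l : List Char) :
    (l.map (fun c => if p c then 1 else 0)).sum = (l.filter p).length := by
  induction l with
  | nil => rfl
  | cons c t ih => by_cases h : p c <;> simp [h, ih] <;> omega

theorem filter_alpha_eq_cat0 (l : List Char) :
    l.filter (fun c => PySem.Chars.isalpha c) = l.filter (fun c => pvCat c == 0) := by
  apply List.filter_congr
  intro c _
  unfold pvCat; split_ifs <;> simp_all

theorem filter_digit_eq_cat1 (l : List Char) :
    l.filter (fun c => PySem.Chars.isdigit c) = l.filter (fun c => pvCat c == 1) := by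
  apply List.filter_congr
  intro c _
  unfold pvCat
  by_cases h1 : PySem.Chars.isalpha c
  · simp [h1, alpha_not_digit c h1]
  · by_cases h2 : PySem.Chars.isdigit c <;> simp [h1, h2]

-- ===== VERDICT (by name: the statement is the Claim_ definition above) =====
theorem segregate_char_num_special_spec : Claim_equal_segregate_char_num_special := by
  intro s _
  unfold Spec_segregate_char_num_special segregate_char_num_special segregate_char_num_special_alt
  simp only [segregate_fold_eq, List.nil_append, sorted_cat_eq_groups,
    sum_indicator_eq_length_filter, filter_alpha_eq_cat0, filter_digit_eq_cat1]
  set f0 := s.toList.filter (fun c => pvCat c == 0)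
  set f1 := s.toList.filter (fun c => pvCat c == 1)
  set f2 := s.toList.filter (fun c => pvCat c == 2)
  refine congrArg₂ Prod.mk ?_ (congrArg₂ Prod.mk ?_ ?_)
  · rw [show f0 ++ f1 ++ f2 = f0 ++ (f1 ++ f2) by simp, List.take_left' rfl]
  · rw [show f0 ++ f1 ++ f2 = f0 ++ (f1 ++ f2) by simp, List.drop_left' rfl,
      List.take_left' rfl]
  · rw [show f0 ++ f1 ++ f2 = (f0 ++ f1) ++ f2 by simp,
      List.drop_left' (by simp)]
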